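-- pv_equiv track=rewrite | github.com/abrar177/rock-papers-sciessors-game | HW6.py | even_cols
-- ===== SOURCE A (Python) =====
-- def even_cols(matrix):
--     """
--     using the matrix from the last problem to determine if the columns have an equal numbers of 1.
--     using for loops to repeat the process of going through num_rows and using module to see if it's divisible by 2.
--
--     :param matrix: matrix is the parameter that the function is taking.
--     :return: returning even_columns which contain the indexes of columns with an even numbers of 1.
--     :if statements: if not matrix bascially returns an empty list when the matrix is empty.
--     """
--     even_columns = []  #An empty list to store column indexes
--
--
--     if not matrix:
--         return even_columns  # Returns an empty list if the matrix is empty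
--
--     #number of rows and columns in the input matrix
--     num_rows = len(matrix)     #tells us the length of the matrix
--     num_cols = len(matrix[0])    #length of matrix at value 0
--
--     #for loop for columns and counts 0s
--     for col in range(num_cols):
--         count_ones = 0   #counts number of 1s in current column
--         for row in range(num_rows):
--             count_ones += matrix[row][col]   #add matrix rows and columns
--
--         #see if it has even numbers of 1
--         if count_ones % 2 == 0:
--             even_columns.append(col)
--
--     return even_columns #gives back indexes of columns with an even numbers of 1
-- ===== SOURCE B (Python) =====
-- def even_cols(matrix):
--     if not matrix:
--         return []
--     num_cols = len(matrix[0])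
--     counts = [0] * num_cols
--     for row in matrix:
--         counts = [counts[c] + row[c] for c in range(num_cols)]
--     return [c for c in range(num_cols) if counts[c] % 2 == 0]
-- ===== Notes on version B (the rewrite author's own statement) =====
-- stated objective: alternative
-- what changed: Replaces A's column-major nested index loops (one full matrix scan per column) by a single row-major pass that accumulates a per-column sums array, followed by one selection pass over the column indices.
import Mathlib
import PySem

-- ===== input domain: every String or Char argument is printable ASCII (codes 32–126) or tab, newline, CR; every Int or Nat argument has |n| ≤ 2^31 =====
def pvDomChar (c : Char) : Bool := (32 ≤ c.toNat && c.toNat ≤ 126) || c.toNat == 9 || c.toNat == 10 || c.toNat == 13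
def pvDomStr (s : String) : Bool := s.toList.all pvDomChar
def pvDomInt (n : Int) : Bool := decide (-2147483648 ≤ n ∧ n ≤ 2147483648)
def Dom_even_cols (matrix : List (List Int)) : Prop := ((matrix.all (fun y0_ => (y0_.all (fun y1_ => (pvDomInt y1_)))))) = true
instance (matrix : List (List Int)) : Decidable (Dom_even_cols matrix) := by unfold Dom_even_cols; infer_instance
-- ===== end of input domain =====

-- B replaces A's column-major nested index loops by one row-major pass accumulating a
-- per-column sums array plus a selection pass (alternative decomposition, same cost).


-- ===== PORT A =====
def even_cols (matrix : List (List Int)) : List Int :=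
  if matrix = [] then []
  else
    let numRows : Int := matrix.length
    let numCols : Int := (PySem.List.pyGetD matrix 0 []).length
    (PySem.List.pyRange 0 numCols).foldl (fun evenColumns col =>
      let countOnes := (PySem.List.pyRange 0 numRows).foldl
        (fun s row => s + PySem.List.pyGetD (PySem.List.pyGetD matrix row []) col 0) 0
      if PySem.Int.mod countOnes 2 = 0 then evenColumns ++ [col] else evenColumns) []

-- ===== PORT B =====
def even_cols_alt (matrix : List (List Int)) : List Int :=
  if matrix = [] then []
  else
    let numCols : Int := (PySem.List.pyGetD matrix 0 []).length
    let counts := matrix.foldl (fun counts row =>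
      (PySem.List.pyRange 0 numCols).map
        (fun c => PySem.List.pyGetD counts c 0 + PySem.List.pyGetD row c 0))
      (List.replicate numCols.toNat 0)
    (PySem.List.pyRange 0 numCols).foldl
      (fun out c => if PySem.Int.mod (PySem.List.pyGetD counts c 0) 2 = 0 then out ++ [c] else out) []

-- ===== PRECONDITION & SPEC =====
-- Pre_ excludes exactly the ragged matrices with a row shorter than the first row,
-- on which both A and B raise IndexError.
def Pre_even_cols (matrix : List (List Int)) : Prop :=
  ∀ row ∈ matrix, (matrix.headD []).length ≤ row.length
instance (matrix : List (List Int)) : Decidable (Pre_even_cols matrix) := by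
  unfold Pre_even_cols; infer_instance
def pvWitness_even_cols : List (List Int) := [[1, 0, 1], [0, 0, 1], [1, 1, 1]]

def Spec_even_cols (matrix : List (List Int)) (out : List Int) : Prop := out = even_cols_alt matrix
instance (matrix : List (List Int)) (out : List Int) : Decidable (Spec_even_cols matrix out) := by unfold Spec_even_cols; infer_instance

-- ===== CLAIM (what is proved, stated in full; the proofs are below) =====
def Claim_equal_even_cols : Prop := ∀ (matrix : List (List Int)), Dom_even_cols matrix → Pre_even_cols matrix → Spec_even_cols matrix (even_cols matrix)

-- ===== LEMMAS AND PROOFS =====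

-- B's accumulated counts list holds, at each column index, the sum of that column.
lemma counts_get (rows : List (List Int)) (n : Nat) (counts : List Int) (c : Nat) (hc : c < n) :
    PySem.List.pyGetD
      (rows.foldl (fun counts row =>
        (PySem.List.pyRange 0 (n : Int)).map
          (fun i => PySem.List.pyGetD counts i 0 + PySem.List.pyGetD row i 0)) counts)
      (c : Int) 0
    = PySem.List.pyGetD counts (c : Int) 0
      + (rows.map (fun row => PySem.List.pyGetD row (c : Int) 0)).sum := by
  induction rows generalizing counts with
  | nil => simp
  | cons r rs ih =>
    simp only [List.foldl_cons, List.map_cons, List.sum_cons]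
    rw [ih, PySem.List.pyGetD_map_pyRange _ n c 0 hc]
    ring

-- ===== VERDICT (by name: the statement is the Claim_ definition above) =====

theorem even_cols_spec : Claim_equal_even_cols := by
  intro matrix _ _
  unfold Spec_even_cols
  cases matrix with
  | nil => rfl
  | cons r rs =>
    simp only [even_cols, even_cols_alt, if_neg (List.cons_ne_nil r rs)]
    apply PySem.List.foldl_congr_mem
    intro acc col hcol
    have hbounds := PySem.List.mem_pyRange_one.mp hcol
    have hr : PySem.List.pyGetD (r :: rs) 0 [] = r := by
      simp [PySem.List.pyGetD_of_nonneg _ _ (le_refl 0)]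
    rw [hr] at hcol hbounds ⊢
    have hcnat : col = ((col.toNat : Nat) : Int) := by omega
    have hlt : col.toNat < r.length := by omega
    rw [PySem.List.foldl_pyRange_zero_pyGetD' (r :: rs) [] (fun s row => s + PySem.List.pyGetD row col 0) 0]
    rw [PySem.List.foldl_add]
    rw [hcnat, counts_get (r :: rs) r.length _ col.toNat hlt]
    have hrep : PySem.List.pyGetD (List.replicate ((r.length : Int)).toNat (0 : Int)) ((col.toNat : Nat) : Int) 0 = 0 := by
      rw [PySem.List.pyGetD_of_nonneg _ _ (by positivity)]
      simp
    rw [hrep, zero_add]
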